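-- pv_equiv track=rewrite | github.com/ConstantijnvdP/eidolon | src/motzkin_ds.py | valid_motzkin
-- ===== SOURCE A (Python) =====
-- def valid_motzkin(samp):
--     chk_sum = 0
--     for i in samp:
--         chk_sum += i-1
--         if chk_sum < 0:
--             return False
--         else:
--             continue
--     if chk_sum == 0:
--         return True
--     else:
--         return False
-- ===== SOURCE B (Python) =====
-- def valid_motzkin(samp):
--     # Divide and conquer: for a segment, compute (sum of (x-1), minimum prefix sum
--     # of (x-1)); combine (sL, mL), (sR, mR) -> (sL+sR, min(mL, sL+mR)).
--     # The path is valid iff the total sum is 0 and the minimum prefix sum is >= 0.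
--     def scan(lo, hi):
--         if hi - lo == 1:
--             v = samp[lo] - 1
--             return v, v
--         mid = (lo + hi) // 2
--         sL, mL = scan(lo, mid)
--         sR, mR = scan(mid, hi)
--         return sL + sR, min(mL, sL + mR)
--     if not samp:
--         return True
--     s, m = scan(0, len(samp))
--     return s == 0 and m >= 0
-- ===== Notes on version B (the rewrite author's own statement) =====
-- stated objective: alternative
-- what changed: Replaces A's sequential early-exit scan with a divide-and-conquer reduction: each half yields (segment sum of (x-1), minimum prefix sum), combined associatively as (sL+sR, min(mL, sL+mR)); valid iff total sum is 0 and minimum prefix sum is nonnegative.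
import Mathlib
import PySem

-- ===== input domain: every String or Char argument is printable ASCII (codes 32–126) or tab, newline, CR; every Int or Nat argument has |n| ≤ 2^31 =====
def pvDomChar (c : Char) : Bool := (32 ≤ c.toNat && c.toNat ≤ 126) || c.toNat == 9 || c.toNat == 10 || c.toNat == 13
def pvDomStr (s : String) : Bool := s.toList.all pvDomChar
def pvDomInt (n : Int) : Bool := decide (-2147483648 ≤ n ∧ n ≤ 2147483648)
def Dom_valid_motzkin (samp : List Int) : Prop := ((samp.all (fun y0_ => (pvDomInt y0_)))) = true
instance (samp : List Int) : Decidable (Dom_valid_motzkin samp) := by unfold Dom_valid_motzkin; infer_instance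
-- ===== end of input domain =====

-- B replaces A's sequential early-exit scan by a divide-and-conquer reduction to (segment sum, min prefix sum); alternative algorithm, same cost.


-- ===== PORT A =====
-- A's loop with early exit, as structural recursion carrying chk_sum
def vmLoopA (chk_sum : Int) : List Int → Bool
  | [] => chk_sum == 0
  | i :: rest =>
    let s := chk_sum + (i - 1)
    if s < 0 then false else vmLoopA s rest

def valid_motzkin (samp : List Int) : Bool := vmLoopA 0 samp

-- ===== PORT B =====
-- scan(lo, hi) on the segment samp[lo:hi], here the segment itself (nonempty);
-- returns (sum of (x-1), minimum prefix sum of (x-1)) via divide and conquer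
def vmScan : List Int → Int × Int
  | [] => (0, 0)   -- unreachable: Python's scan is only called with hi - lo ≥ 1
  | [x] => (x - 1, x - 1)
  | x :: y :: rest =>
    let l := x :: y :: rest
    let p := vmScan (l.take (l.length / 2))
    let q := vmScan (l.drop (l.length / 2))
    (p.1 + q.1, min p.2 (p.1 + q.2))
termination_by l => l.length
decreasing_by
  · simp [List.length_take]; omega
  · simp; omega

def valid_motzkin_alt (samp : List Int) : Bool :=
  match samp with
  | [] => true
  | _ =>
    let r := vmScan samp
    (r.1 == 0) && decide (0 ≤ r.2)

-- ===== PRECONDITION & SPEC =====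
def Spec_valid_motzkin (samp : List Int) (out : Bool) : Prop := out = valid_motzkin_alt samp
instance (samp : List Int) (out : Bool) : Decidable (Spec_valid_motzkin samp out) := by unfold Spec_valid_motzkin; infer_instance

-- ===== CLAIM (what is proved, stated in full; the proofs are below) =====
def Claim_equal_valid_motzkin : Prop := ∀ (samp : List Int), Dom_valid_motzkin samp → Spec_valid_motzkin samp (valid_motzkin samp)

-- ===== LEMMAS AND PROOFS =====
-- reference semantics: sum of (x-1) and minimum prefix sum of (x-1) (0 for the empty prefix set)
def vmSum : List Int → Int
  | [] => 0
  | x :: rest => (x - 1) + vmSum rest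

def vmMin : List Int → Int
  | [] => 0
  | x :: rest => min (x - 1) ((x - 1) + vmMin rest)

theorem vmSum_append (l₁ l₂ : List Int) : vmSum (l₁ ++ l₂) = vmSum l₁ + vmSum l₂ := by
  induction l₁ with
  | nil => simp [vmSum]
  | cons x t ih => simp [vmSum, ih]; ring

theorem vmMin_append (l₁ l₂ : List Int) (h₁ : l₁ ≠ []) :
    vmMin (l₁ ++ l₂) = min (vmMin l₁) (vmSum l₁ + vmMin l₂) := by
  induction l₁ with
  | nil => exact absurd rfl h₁
  | cons x t ih =>
    cases t with
    | nil => simp [vmMin, vmSum]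
    | cons y u =>
      have := ih (by simp)
      simp only [List.cons_append, vmMin, vmSum] at *
      rw [this]
      omega

theorem vmScan_eq_aux : ∀ (n : Nat) (l : List Int), l.length ≤ n → l ≠ [] →
    vmScan l = (vmSum l, vmMin l) := by
  intro n
  induction n with
  | zero => intro l hl hne; cases l with
    | nil => exact absurd rfl hne
    | cons x t => simp at hl
  | succ n ih =>
    intro l hl hne
    match l with
    | [x] => simp [vmScan, vmSum, vmMin]
    | x :: y :: rest =>
      have hmid1 : 1 ≤ (x :: y :: rest).length / 2 := by simp; omega
      have hmidlt : (x :: y :: rest).length / 2 < (x :: y :: rest).length := by simp; omega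
      have htk : (x :: y :: rest).take ((x :: y :: rest).length / 2) ≠ [] := by
        intro he; have := congrArg List.length he
        simp [List.length_take] at this
      have hdr : (x :: y :: rest).drop ((x :: y :: rest).length / 2) ≠ [] := by
        intro he; have := congrArg List.length he
        simp at this; omega
      have htl : ((x :: y :: rest).take ((x :: y :: rest).length / 2)).length ≤ n := by
        simp [List.length_take] at hl ⊢; omega
      have hdl : ((x :: y :: rest).drop ((x :: y :: rest).length / 2)).length ≤ n := by
        simp at hl ⊢; omega
      rw [vmScan, ih _ htl htk, ih _ hdl hdr]
      have hsplit : (x :: y :: rest) =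
          (x :: y :: rest).take ((x :: y :: rest).length / 2) ++
          (x :: y :: rest).drop ((x :: y :: rest).length / 2) := (List.take_append_drop _ _).symm
      have hs : vmSum (x :: y :: rest) =
          vmSum ((x :: y :: rest).take ((x :: y :: rest).length / 2)) +
          vmSum ((x :: y :: rest).drop ((x :: y :: rest).length / 2)) := by
        conv_lhs => rw [hsplit]
        rw [vmSum_append]
      have hm : vmMin (x :: y :: rest) =
          min (vmMin ((x :: y :: rest).take ((x :: y :: rest).length / 2)))
              (vmSum ((x :: y :: rest).take ((x :: y :: rest).length / 2)) +
               vmMin ((x :: y :: rest).drop ((x :: y :: rest).length / 2))) := by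
        conv_lhs => rw [hsplit]
        rw [vmMin_append _ _ htk]
      simp [hs, hm]

theorem vmScan_eq (l : List Int) (h : l ≠ []) : vmScan l = (vmSum l, vmMin l) :=
  vmScan_eq_aux l.length l (le_refl _) h

theorem vmLoopA_eq (s : Int) (l : List Int) :
    vmLoopA s l = (decide (0 ≤ s + vmMin l) && (s + vmSum l == 0)) := by
  induction l generalizing s with
  | nil =>
    simp [vmLoopA, vmMin, vmSum]
    omega
  | cons i rest ih =>
    simp only [vmLoopA, vmMin, vmSum]
    by_cases hneg : s + (i - 1) < 0
    · have : ¬ (0 ≤ s + min (i - 1) (i - 1 + vmMin rest)) := by omega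
      simp [hneg, this]
    · have h0 : (0 : Int) ≤ s + (i - 1) := by omega
      rw [if_neg hneg, ih]
      rw [Bool.eq_iff_iff]
      simp only [Bool.and_eq_true, decide_eq_true_eq, beq_iff_eq]
      rcases le_total (i - 1) (i - 1 + vmMin rest) with hm | hm
      · rw [min_eq_left hm]; omega
      · rw [min_eq_right hm]; omega

theorem valid_motzkin_spec : Claim_equal_valid_motzkin := by
  intro samp _
  unfold Spec_valid_motzkin valid_motzkin valid_motzkin_alt
  cases samp with
  | nil => simp [vmLoopA]
  | cons x t =>
    rw [vmLoopA_eq, vmScan_eq _ (by simp)]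
    simp [Bool.and_comm]
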